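-- pv_equiv track=rewrite | github.com/yukchingg/CS50-Porject | Problem set2/plates.py | no_mid_digit
-- ===== SOURCE A (Python) =====
-- def no_mid_digit(s):
--     digit_flag = False
--
--     for ch in s:
--         if ch.isdigit():
--             digit_flag = True
--         if ch.isalpha() and digit_flag:
--             return False
--     return True
-- ===== SOURCE B (Python) =====
-- def no_mid_digit(s):
--     for i, ch in enumerate(s):
--         if ch.isdigit():
--             return not any(c.isalpha() for c in s[i + 1:])
--     return True
-- ===== Notes on version B (the rewrite author's own statement) =====
-- stated objective: alternative
-- what changed: Replaces the running digit_flag single pass by a two-phase locate-then-check: find the first digit, then scan only the suffix after it for a letter.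
import Mathlib
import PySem

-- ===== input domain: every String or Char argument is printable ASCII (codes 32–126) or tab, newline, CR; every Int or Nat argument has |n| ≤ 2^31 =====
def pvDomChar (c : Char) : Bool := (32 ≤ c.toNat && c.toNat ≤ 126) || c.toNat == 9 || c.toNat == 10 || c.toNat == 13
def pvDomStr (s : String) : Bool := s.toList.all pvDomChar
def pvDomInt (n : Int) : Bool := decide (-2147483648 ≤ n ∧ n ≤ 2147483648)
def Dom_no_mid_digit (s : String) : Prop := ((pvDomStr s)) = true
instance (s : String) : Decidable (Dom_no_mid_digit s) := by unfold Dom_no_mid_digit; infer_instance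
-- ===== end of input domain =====

-- B replaces A's running digit_flag by a locate-first-digit-then-scan-suffix decomposition (alternative, same cost).

-- ===== PORT A =====
-- the for-loop of A over the characters, carrying digit_flag
def noMidDigitLoopA : List Char → Bool → Bool
  | [], _ => true
  | c :: rest, flag =>
    let flag' := if PySem.Chars.isdigit c then true else flag
    if PySem.Chars.isalpha c && flag' then false else noMidDigitLoopA rest flag'

def no_mid_digit (s : String) : Bool := noMidDigitLoopA s.toList false

-- ===== PORT B =====
-- B's enumerate-loop: find the first digit; 'rest' is the slice s[i+1:] there
def noMidDigitLoopB : List Char → Bool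
  | [] => true
  | c :: rest =>
    if PySem.Chars.isdigit c then !(rest.any PySem.Chars.isalpha)
    else noMidDigitLoopB rest

def no_mid_digit_alt (s : String) : Bool := noMidDigitLoopB s.toList

-- ===== PRECONDITION & SPEC =====
def Spec_no_mid_digit (s : String) (out : Bool) : Prop := out = no_mid_digit_alt s
instance (s : String) (out : Bool) : Decidable (Spec_no_mid_digit s out) := by unfold Spec_no_mid_digit; infer_instance

-- ===== CLAIM (what is proved, stated in full; the proofs are below) =====
def Claim_equal_no_mid_digit : Prop := ∀ (s : String), Dom_no_mid_digit s → Spec_no_mid_digit s (no_mid_digit s)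

-- ===== LEMMAS AND PROOFS =====

-- no character is both a Python digit and a Python letter
theorem isdigit_not_isalpha (c : Char) (h : PySem.Chars.isdigit c = true) :
    PySem.Chars.isalpha c = false := by
  simp only [PySem.Chars.isdigit, Char.le_def, UInt32.le_iff_toNat_le, decide_eq_true_eq,
    Bool.and_eq_true] at h
  simp only [PySem.Chars.isalpha, PySem.Chars.isupper, PySem.Chars.islower, Char.le_def,
    UInt32.le_iff_toNat_le, Bool.or_eq_false_iff, Bool.and_eq_false_iff, decide_eq_false_iff_not,
    not_le]
  have e0 : ('0'.val.toNat) = 48 := rfl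
  have e9 : ('9'.val.toNat) = 57 := rfl
  have eA : ('A'.val.toNat) = 65 := rfl
  have eZ : ('Z'.val.toNat) = 90 := rfl
  have ea : ('a'.val.toNat) = 97 := rfl
  have ez : ('z'.val.toNat) = 122 := rfl
  omega

-- once the flag is set, A just scans the remainder for a letter
theorem loopA_true (l : List Char) :
    noMidDigitLoopA l true = !(l.any PySem.Chars.isalpha) := by
  induction l with
  | nil => simp [noMidDigitLoopA]
  | cons c rest ih =>
    by_cases ha : PySem.Chars.isalpha c = true <;>
      simp [noMidDigitLoopA, ha, ih]

-- before any digit, A and B agree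
theorem loopA_false (l : List Char) :
    noMidDigitLoopA l false = noMidDigitLoopB l := by
  induction l with
  | nil => rfl
  | cons c rest ih =>
    by_cases hd : PySem.Chars.isdigit c = true
    · simp [noMidDigitLoopA, noMidDigitLoopB, hd, isdigit_not_isalpha c hd, loopA_true]
    · by_cases ha : PySem.Chars.isalpha c = true <;>
        simp [noMidDigitLoopA, noMidDigitLoopB, hd, ha, ih]

-- ===== VERDICT (by name: the statement is the Claim_ definition above) =====
theorem no_mid_digit_spec : Claim_equal_no_mid_digit := by
  intro s _
  unfold Spec_no_mid_digit no_mid_digit no_mid_digit_alt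
  exact loopA_false s.toList
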